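-- pv_equiv track=rewrite | github.com/mhattingpete/nemlig-shopper | nemlig_shopper/pantry.py | _is_pantry_item
-- ===== SOURCE A (Python) =====
-- def _normalize_for_matching(name: str) -> str:
--     """Normalize ingredient name for pantry matching."""
--     return name.lower().strip()
--
-- def _is_pantry_item(ingredient_name: str, pantry_items: set[str]) -> bool:
--     """Check if an ingredient matches any pantry item."""
--     normalized = _normalize_for_matching(ingredient_name)
--
--     # Exact match
--     if normalized in pantry_items:
--         return True
--
--     # Check if any pantry item is contained in the ingredient name
--     # e.g., "olive oil" matches "extra virgin olive oil"
--     for item in pantry_items: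
--         item_lower = item.lower()
--         if item_lower in normalized or normalized in item_lower:
--             return True
--
--     # Check individual words for common items like "salt", "pepper"
--     words = normalized.split()
--     single_word_pantry = {p.lower() for p in pantry_items if " " not in p}
--     for word in words:
--         if word in single_word_pantry:
--             return True
--
--     return False
-- ===== SOURCE B (Python) =====
-- def _normalize_for_matching(name: str) -> str:
--     """Normalize ingredient name for pantry matching."""
--     return name.lower().strip()
--
-- def _is_pantry_item(ingredient_name: str, pantry_items: set[str]) -> bool:
--     """Check if an ingredient matches any pantry item.
--
--     A single bidirectional substring scan suffices: an exact match is an item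
--     whose lowercase form equals `normalized` (so it is a substring of it), and
--     every word of normalized.split() is a contiguous substring of `normalized`,
--     so a single-word pantry hit is also a substring hit.
--     """
--     normalized = _normalize_for_matching(ingredient_name)
--     for item in pantry_items:
--         item_lower = item.lower()
--         if item_lower in normalized or normalized in item_lower:
--             return True
--     return False
-- ===== Notes on version B (the rewrite author's own statement) =====
-- stated objective: simpler
-- what changed: B eliminates two of A's three phases entirely: the exact set-membership test and the build-a-single-word-set-then-scan-the-ingredient's-words phase are proved redundant (an exact match is an item whose lowercase equals normalized, hence a substring hit; every word of normalized.split() is a contiguous substring of normalized, so a word hit is a substring hit too), leaving a single bidirectional-substring scan over pantry_items with no auxiliary set.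
import Mathlib
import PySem

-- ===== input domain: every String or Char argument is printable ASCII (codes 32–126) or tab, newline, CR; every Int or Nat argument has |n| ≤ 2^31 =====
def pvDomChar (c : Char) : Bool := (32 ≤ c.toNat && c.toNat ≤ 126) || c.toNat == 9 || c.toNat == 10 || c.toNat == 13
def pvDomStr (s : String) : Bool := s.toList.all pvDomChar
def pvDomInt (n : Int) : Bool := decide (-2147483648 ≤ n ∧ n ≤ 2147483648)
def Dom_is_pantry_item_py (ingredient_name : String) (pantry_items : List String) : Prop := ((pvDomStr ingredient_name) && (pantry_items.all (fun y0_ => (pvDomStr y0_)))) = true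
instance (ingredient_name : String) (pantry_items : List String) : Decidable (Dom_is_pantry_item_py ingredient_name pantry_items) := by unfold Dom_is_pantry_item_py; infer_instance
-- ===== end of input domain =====

-- B drops A's exact-match and single-word phases as provably redundant (both are special
-- cases of the bidirectional substring test), leaving one scan with no auxiliary set; equal
-- return value proved below.

-- ===== PORT A =====
def normalize_for_matching_py (name : String) : String :=
  PySem.Str.strip (PySem.Str.lower name)

def is_pantry_item_py (ingredient_name : String) (pantry_items : List String) : Bool :=
  let normalized := normalize_for_matching_py ingredient_name
  if PySem.Set.contains pantry_items normalized then true
  else if pantry_items.any (fun item =>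
      let item_lower := PySem.Str.lower item
      PySem.Str.isIn item_lower normalized || PySem.Str.isIn normalized item_lower) then true
  else
    let words := PySem.Str.split₀ normalized
    let single_word_pantry := PySem.Set.ofList
      ((pantry_items.filter (fun p => !PySem.Str.isIn " " p)).map PySem.Str.lower)
    words.any (fun word => PySem.Set.contains single_word_pantry word)

-- ===== PORT B =====
def is_pantry_item_py_alt (ingredient_name : String) (pantry_items : List String) : Bool :=
  let normalized := PySem.Str.strip (PySem.Str.lower ingredient_name)
  pantry_items.any (fun item =>
    let item_lower := PySem.Str.lower item
    PySem.Str.isIn item_lower normalized || PySem.Str.isIn normalized item_lower)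

-- ===== PRECONDITION & SPEC =====
def Spec_is_pantry_item_py (ingredient_name : String) (pantry_items : List String) (out : Bool) : Prop := out = is_pantry_item_py_alt ingredient_name pantry_items
instance (ingredient_name : String) (pantry_items : List String) (out : Bool) : Decidable (Spec_is_pantry_item_py ingredient_name pantry_items out) := by unfold Spec_is_pantry_item_py; infer_instance

-- ===== CLAIM =====
def Claim_equal_is_pantry_item_py : Prop := ∀ (ingredient_name : String) (pantry_items : List String), Dom_is_pantry_item_py ingredient_name pantry_items → Spec_is_pantry_item_py ingredient_name pantry_items (is_pantry_item_py ingredient_name pantry_items)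

-- ===== LEMMAS AND PROOFS =====
theorem pv_char_le_iff (a b : Char) : a ≤ b ↔ a.toNat ≤ b.toNat := by
  rw [Char.le_def, UInt32.le_iff_toNat_le]; rfl

theorem pv_lowerChar_idem (c : Char) :
    PySem.Chars.lowerChar (PySem.Chars.lowerChar c) = PySem.Chars.lowerChar c := by
  unfold PySem.Chars.lowerChar PySem.Chars.isupper
  by_cases hB : (decide ('A' ≤ c) && decide (c ≤ 'Z')) = true
  · have hc : 65 ≤ c.toNat ∧ c.toNat ≤ 90 := by
      simp only [Bool.and_eq_true, decide_eq_true_eq] at hB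
      exact ⟨(pv_char_le_iff _ _).1 hB.1, (pv_char_le_iff _ _).1 hB.2⟩
    have hval : (Char.ofNat (c.toNat + 32)).toNat = c.toNat + 32 := by
      rw [Char.toNat_ofNat, if_pos]; exact Or.inl (by omega)
    have hZ : ¬ (Char.ofNat (c.toNat + 32) ≤ 'Z') := by
      rw [pv_char_le_iff, hval]; show ¬ (c.toNat + 32 ≤ 90); omega
    simp [hB, hZ]
  · simp only [Bool.not_eq_true] at hB
    simp [hB]

theorem pv_mem_strip {c : Char} {l : List Char} (h : c ∈ PySem.Chars.strip l) : c ∈ l := by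
  unfold PySem.Chars.strip PySem.Chars.rstrip PySem.Chars.lstrip at h
  simp only [List.mem_reverse] at h
  have h1 := (List.dropWhile_sublist (l := (List.dropWhile PySem.Chars.isspace l).reverse)
    (p := PySem.Chars.isspace)).mem h
  simp only [List.mem_reverse] at h1
  exact (List.dropWhile_sublist (l := l) (p := PySem.Chars.isspace)).mem h1

-- normalized = strip(lower(s)) is already lowercase: lowering it again changes nothing
theorem pv_lower_normalized (s : String) :
    PySem.Str.lower (PySem.Str.strip (PySem.Str.lower s)) = PySem.Str.strip (PySem.Str.lower s) := by
  apply String.toList_injective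
  rw [PySem.Str.toList_lower, PySem.Str.toList_strip, PySem.Str.toList_lower]
  conv_rhs => rw [← List.map_id (PySem.Chars.strip (PySem.Chars.lower s.toList))]
  apply List.map_congr_left
  intro c hc
  have hm := pv_mem_strip hc
  rw [PySem.Chars.lower] at hm
  obtain ⟨d, _, rfl⟩ := List.mem_map.1 hm
  exact pv_lowerChar_idem d

theorem pv_isIn_self (s : String) : PySem.Str.isIn s s = true := by
  rw [PySem.Str.isIn_iff_infix]

-- every piece produced by split₀.go lies in acc or is an infix of cur.reverse ++ s
theorem pv_go_infix (w : List Char) :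
    ∀ (s cur : List Char) (acc : List (List Char)),
      w ∈ PySem.Chars.split₀.go s cur acc → w ∈ acc ∨ w <:+: (cur.reverse ++ s) := by
  intro s
  induction s with
  | nil =>
    intro cur acc h
    unfold PySem.Chars.split₀.go at h
    split_ifs at h with hc
    · simp only [List.mem_reverse] at h
      exact Or.inl h
    · simp only [List.mem_reverse, List.mem_cons] at h
      rcases h with h | h
      · subst h
        exact Or.inr ⟨[], [], by simp⟩
      · exact Or.inl h
  | cons c rest ih =>
    intro cur acc h
    unfold PySem.Chars.split₀.go at h
    split_ifs at h with hsp hc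
    · rcases ih [] acc h with h' | h'
      · exact Or.inl h'
      · exact Or.inr (h'.trans ⟨cur.reverse ++ [c], [], by simp⟩)
    · rcases ih [] (cur.reverse :: acc) h with h' | h'
      · rcases List.mem_cons.1 h' with h'' | h''
        · subst h''
          exact Or.inr ⟨[], c :: rest, by simp⟩
        · exact Or.inl h''
      · exact Or.inr (h'.trans ⟨cur.reverse ++ [c], [], by simp⟩)
    · rcases ih (c :: cur) acc h with h' | h'
      · exact Or.inl h'
      · exact Or.inr (by simpa using h')

-- every word of s.split() is an infix of s
theorem pv_split₀_infix {w s : String} (h : w ∈ PySem.Str.split₀ s) :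
    w.toList <:+: s.toList := by
  unfold PySem.Str.split₀ at h
  obtain ⟨l, hl, rfl⟩ := List.mem_map.1 h
  rw [PySem.Chars.split₀] at hl
  rcases pv_go_infix l s.toList [] [] hl with h' | h'
  · cases h'
  · simpa using h'

-- A's three phases equal B's single substring scan, for any already-lowercase needle n
theorem pv_main (n : String) (pantry : List String) (hln : PySem.Str.lower n = n) :
    (if PySem.Set.contains pantry n then true
     else if pantry.any (fun item =>
        PySem.Str.isIn (PySem.Str.lower item) n || PySem.Str.isIn n (PySem.Str.lower item)) then true
     else (PySem.Str.split₀ n).any (fun word => PySem.Set.contains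
        (PySem.Set.ofList ((pantry.filter (fun p => !PySem.Str.isIn " " p)).map PySem.Str.lower)) word))
    = pantry.any (fun item =>
        PySem.Str.isIn (PySem.Str.lower item) n || PySem.Str.isIn n (PySem.Str.lower item)) := by
  by_cases h1 : PySem.Set.contains pantry n = true
  · rw [if_pos h1]
    symm
    rw [List.any_eq_true]
    refine ⟨n, (PySem.Set.contains_iff _ _).1 h1, ?_⟩
    simp only [hln, pv_isIn_self, Bool.true_or]
  · rw [if_neg h1]
    by_cases h2 : pantry.any (fun item =>
        PySem.Str.isIn (PySem.Str.lower item) n || PySem.Str.isIn n (PySem.Str.lower item)) = true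
    · rw [if_pos h2, h2]
    · rw [if_neg h2]
      symm
      rw [Bool.eq_iff_iff]
      constructor
      · intro h
        exact absurd h h2
      · intro h
        rw [List.any_eq_true] at h
        obtain ⟨w, hw, hmem⟩ := h
        rw [PySem.Set.contains_iff, PySem.Set.mem_ofList] at hmem
        obtain ⟨p, hpf, hlp⟩ := List.mem_map.1 hmem
        obtain ⟨hp, _⟩ := List.mem_filter.1 hpf
        -- the lowered item equals a word of n, hence is a substring of n
        have hin : PySem.Str.isIn (PySem.Str.lower p) n = true := by
          rw [PySem.Str.isIn_iff_infix, hlp]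
          exact pv_split₀_infix hw
        rw [List.any_eq_true]
        exact ⟨p, hp, by rw [Bool.or_eq_true]; exact Or.inl hin⟩

-- ===== VERDICT =====
theorem is_pantry_item_py_spec : Claim_equal_is_pantry_item_py := by
  intro s pantry _
  unfold Spec_is_pantry_item_py
  simp only [is_pantry_item_py, is_pantry_item_py_alt, normalize_for_matching_py]
  exact pv_main (PySem.Str.strip (PySem.Str.lower s)) pantry (pv_lower_normalized s)
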